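-- pv_equiv track=rewrite | github.com/Naringenina/proyecto2 | app/routers/items.py | _index_for
-- ===== SOURCE A (Python) =====
-- from typing import Optional, Dict, Any, List, Tuple
--
-- _FIELD_SYNONYMS: Dict[str, List[str]] = {
--     "name": ["name", "card_name", "nombre"],
--     "game": ["game", "juego"],
--     "set_name": ["set_name", "set", "collection", "coleccion", "colección"],
--     "set_code": ["set_code", "code", "setcode", "codigo_set", "código_set"],
--     "number_set": ["number_set", "set_number", "number", "no", "número"],
--     "rarity": ["rarity", "rareza"],
--     "condition": ["condition", "estado"],
--     "language": ["language", "lang", "idioma"],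
--     "quantity": ["quantity", "qty", "cantidad", "stock"],
--     "location": ["location", "ubicacion", "ubicación", "where"],
--     "comercial_condition": ["comercial_condition", "status", "estado_comercial", "commercial_status"],
--     "variant": ["variant", "variante", "finish", "foil"],
--     "notes": ["notes", "nota", "observaciones", "comments"],
--     "tags": ["tags", "etiquetas", "labels"],
-- }
--
-- def _index_for(field: str, headers: List[str]) -> Optional[int]:
--     want = field.lower()
--     for i, h in enumerate(headers):
--         hl = (h or "").strip().lower()
--         if not hl:
--             continue
--         if hl == want:
--             return i
--     for syn in _FIELD_SYNONYMS.get(field, []):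
--         for i, h in enumerate(headers):
--             if (h or "").strip().lower() == syn:
--                 return i
--     return None
-- ===== SOURCE B (Python) =====
-- from typing import Optional, Dict, List
--
-- _FIELD_SYNONYMS: Dict[str, List[str]] = {
--     "name": ["name", "card_name", "nombre"],
--     "game": ["game", "juego"],
--     "set_name": ["set_name", "set", "collection", "coleccion", "colección"],
--     "set_code": ["set_code", "code", "setcode", "codigo_set", "código_set"],
--     "number_set": ["number_set", "set_number", "number", "no", "número"],
--     "rarity": ["rarity", "rareza"],
--     "condition": ["condition", "estado"],
--     "language": ["language", "lang", "idioma"],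
--     "quantity": ["quantity", "qty", "cantidad", "stock"],
--     "location": ["location", "ubicacion", "ubicación", "where"],
--     "comercial_condition": ["comercial_condition", "status", "estado_comercial", "commercial_status"],
--     "variant": ["variant", "variante", "finish", "foil"],
--     "notes": ["notes", "nota", "observaciones", "comments"],
--     "tags": ["tags", "etiquetas", "labels"],
-- }
--
-- def _index_for(field: str, headers: List[str]) -> Optional[int]:
--     # Priority-ranked candidates: the lowered field itself, then its synonyms.
--     # One argmin pass over the headers: keep the (rank, index) pair with the
--     # smallest rank, earliest header winning ties.
--     cands = [field.lower()] + _FIELD_SYNONYMS.get(field, [])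
--     rank: Dict[str, int] = {}
--     for r, c in enumerate(cands):
--         if c:
--             rank.setdefault(c, r)
--     best = None
--     for i, h in enumerate(headers):
--         r = rank.get((h or "").strip().lower())
--         if r is not None and (best is None or r < best[0]):
--             best = (r, i)
--     return best[1] if best is not None else None
-- ===== Notes on version B (the rewrite author's own statement) =====
-- stated objective: alternative
-- what changed: B inverts the loop structure: instead of A's staged full rescans of the headers per candidate (field first, then each synonym), B assigns each candidate a priority rank once and makes a single argmin pass over the headers, keeping the (rank, index) pair with smallest rank and earliest index.
import Mathlib
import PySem

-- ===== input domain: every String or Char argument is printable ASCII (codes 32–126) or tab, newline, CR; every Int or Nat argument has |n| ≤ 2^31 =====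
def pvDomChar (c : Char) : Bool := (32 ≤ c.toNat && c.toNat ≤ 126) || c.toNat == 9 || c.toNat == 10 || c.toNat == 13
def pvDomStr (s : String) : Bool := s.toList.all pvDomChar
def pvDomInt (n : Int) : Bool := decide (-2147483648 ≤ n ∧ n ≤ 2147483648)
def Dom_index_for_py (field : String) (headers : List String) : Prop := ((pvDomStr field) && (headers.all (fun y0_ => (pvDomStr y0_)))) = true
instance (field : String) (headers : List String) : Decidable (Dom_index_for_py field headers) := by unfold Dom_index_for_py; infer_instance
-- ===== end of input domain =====

-- B replaces A's staged per-candidate rescans of the headers with one ranked-candidate table and a single argmin pass over the headers (alternative decomposition; not measured faster).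


-- shared module constant _FIELD_SYNONYMS
def pvFieldSynonyms : PySem.Dict String (List String) := PySem.Dict.ofList [
  ("name", ["name", "card_name", "nombre"]),
  ("game", ["game", "juego"]),
  ("set_name", ["set_name", "set", "collection", "coleccion", "colección"]),
  ("set_code", ["set_code", "code", "setcode", "codigo_set", "código_set"]),
  ("number_set", ["number_set", "set_number", "number", "no", "número"]),
  ("rarity", ["rarity", "rareza"]),
  ("condition", ["condition", "estado"]),
  ("language", ["language", "lang", "idioma"]),
  ("quantity", ["quantity", "qty", "cantidad", "stock"]),
  ("location", ["location", "ubicacion", "ubicación", "where"]),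
  ("comercial_condition", ["comercial_condition", "status", "estado_comercial", "commercial_status"]),
  ("variant", ["variant", "variante", "finish", "foil"]),
  ("notes", ["notes", "nota", "observaciones", "comments"]),
  ("tags", ["tags", "etiquetas", "labels"])]

-- (h or "").strip().lower() — for a String, 'h or ""' is h itself
def pvNorm (h : String) : String := PySem.Str.lower (PySem.Str.strip h)

-- ===== PORT A =====
-- first loop of A: skip empty normalized headers, return index of first match with want
def aFirstLoop (want : String) (i : Int) : List String → Option Int
  | [] => none
  | h :: t =>
    let hl := pvNorm h
    if hl = "" then aFirstLoop want (i + 1) t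
    else if hl = want then some i else aFirstLoop want (i + 1) t

-- inner loop of A's synonym pass: first index whose normalized header equals syn
def aMatch (syn : String) (i : Int) : List String → Option Int
  | [] => none
  | h :: t => if pvNorm h = syn then some i else aMatch syn (i + 1) t

-- outer synonym loop of A
def aSynLoop (headers : List String) : List String → Option Int
  | [] => none
  | syn :: rest =>
    match aMatch syn 0 headers with
    | some i => some i
    | none => aSynLoop headers rest

def index_for_py (field : String) (headers : List String) : Option Int :=
  let want := PySem.Str.lower field
  match aFirstLoop want 0 headers with
  | some i => some i
  | none => aSynLoop headers ((pvFieldSynonyms.get? field).getD [])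

-- ===== PORT B =====
-- B's candidate list in priority order: [field.lower()] + synonyms
def bCands (field : String) : List String :=
  PySem.Str.lower field :: (pvFieldSynonyms.get? field).getD []

-- 'for r, c in enumerate(cands): if c: rank.setdefault(c, r)'
def bRank (r : Int) (d : PySem.Dict String Int) : List String → PySem.Dict String Int
  | [] => d
  | c :: t => if c = "" then bRank (r + 1) d t else bRank (r + 1) (d.setdefault c r) t

-- 'best is None or r < best[0]'
def bBetter (r : Int) (best : Option (Int × Int)) : Bool :=
  match best with
  | none => true
  | some b => r < b.1

-- single argmin pass over enumerate(headers)
def bScan (rk : PySem.Dict String Int) (i : Int) (best : Option (Int × Int)) : List String → Option (Int × Int)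
  | [] => best
  | h :: t =>
    match rk.get? (pvNorm h) with
    | some r => if bBetter r best then bScan rk (i + 1) (some (r, i)) t else bScan rk (i + 1) best t
    | none => bScan rk (i + 1) best t

def index_for_py_alt (field : String) (headers : List String) : Option Int :=
  let rk := bRank 0 PySem.Dict.empty (bCands field)
  match bScan rk 0 none headers with
  | some b => some b.2
  | none => none

-- ===== PRECONDITION & SPEC =====
def Spec_index_for_py (field : String) (headers : List String) (out : Option Int) : Prop := out = index_for_py_alt field headers
instance (field : String) (headers : List String) (out : Option Int) : Decidable (Spec_index_for_py field headers out) := by unfold Spec_index_for_py; infer_instance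

-- ===== CLAIM (what is proved, stated in full; the proofs are below) =====
def Claim_equal_index_for_py : Prop := ∀ (field : String) (headers : List String), Dom_index_for_py field headers → Spec_index_for_py field headers (index_for_py field headers)

-- ===== LEMMAS AND PROOFS =====

-- first index ≥ r of a NON-EMPTY candidate equal to s (reference semantics of B's rank dict)
def cFirst (s : String) (r : Int) : List String → Option Int
  | [] => none
  | c :: t => if c = "" then cFirst s (r + 1) t else if c = s then some r else cFirst s (r + 1) t

-- the (rank, index) pairs of the headers that match some candidate, in header order
def matched (cs : List String) (i : Int) : List String → List (Int × Int)
  | [] => []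
  | h :: t =>
    match cFirst (pvNorm h) 0 cs with
    | some r => (r, i) :: matched cs (i + 1) t
    | none => matched cs (i + 1) t

-- pure form of B's scan
def foldMin (best : Option (Int × Int)) : List (Int × Int) → Option (Int × Int)
  | [] => best
  | p :: L => if bBetter p.1 best then foldMin (some p) L else foldMin best L

-- pure form of A: try candidates in priority order, full header scan each
def tryAll (hs : List String) (i0 : Int) : List String → Option Int
  | [] => none
  | c :: cs =>
    match aFirstLoop c i0 hs with
    | some j => some j
    | none => tryAll hs i0 cs

theorem get?_bRank (cs : List String) (r : Int) (d : PySem.Dict String Int) (s : String) :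
    (bRank r d cs).get? s = (d.get? s).or (cFirst s r cs) := by
  induction cs generalizing r d with
  | nil => simp [bRank, cFirst]
  | cons c t ih =>
    simp only [bRank, cFirst]
    by_cases he : c = ""
    · rw [if_pos he, if_pos he, ih]
    · rw [if_neg he, if_neg he, ih]
      by_cases hs : c = s
      · subst hs
        rw [if_pos rfl, PySem.Dict.get?_setdefault_self]
        cases hq : d.get? c <;> simp
      · have hne : s ≠ c := fun h' => hs h'.symm
        rw [if_neg hs, PySem.Dict.get?_setdefault_of_ne d r hne]

theorem cFirst_shift (cs : List String) (s : String) (r : Int) :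
    cFirst s r cs = (cFirst s 0 cs).map (fun x => x + r) := by
  induction cs generalizing r with
  | nil => simp [cFirst]
  | cons c t ih =>
    simp only [cFirst]
    by_cases he : c = ""
    · rw [if_pos he, if_pos he, ih (r + 1), ih (0 + 1)]
      cases cFirst s 0 t with
      | none => simp
      | some v => simp; omega
    · rw [if_neg he, if_neg he]
      by_cases hs : c = s
      · rw [if_pos hs, if_pos hs]; simp
      · rw [if_neg hs, if_neg hs, ih (r + 1), ih (0 + 1)]
        cases cFirst s 0 t with
        | none => simp
        | some v => simp; omega

-- cons-step of cFirst when the head candidate does not fire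
theorem cFirst_cons (s c : String) (cs : List String) (h : c = "" ∨ c ≠ s) :
    cFirst s 0 (c :: cs) = (cFirst s 0 cs).map (fun v => v + 1) := by
  simp only [cFirst]
  by_cases hce : c = ""
  · rw [if_pos hce, cFirst_shift]
    cases cFirst s 0 cs <;> simp
  · have hne : c ≠ s := h.resolve_left hce
    rw [if_neg hce, if_neg hne, cFirst_shift]
    cases cFirst s 0 cs <;> simp

theorem cFirst_ge (cs : List String) (s : String) (r q : Int) (h : cFirst s r cs = some q) : r ≤ q := by
  induction cs generalizing r with
  | nil => simp [cFirst] at h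
  | cons c t ih =>
    simp only [cFirst] at h
    by_cases he : c = ""
    · rw [if_pos he] at h; have := ih (r + 1) h; omega
    · rw [if_neg he] at h
      by_cases hs : c = s
      · rw [if_pos hs] at h; injection h with h'; omega
      · rw [if_neg hs] at h; have := ih (r + 1) h; omega

theorem cFirst_none_empty (cs : List String) (r : Int) : cFirst "" r cs = none := by
  induction cs generalizing r with
  | nil => rfl
  | cons c t ih =>
    simp only [cFirst]
    by_cases he : c = ""
    · rw [if_pos he, ih]
    · rw [if_neg he, if_neg he, ih]

theorem matched_nonneg (cs hs : List String) (i : Int) (p : Int × Int)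
    (h : p ∈ matched cs i hs) : 0 ≤ p.1 := by
  induction hs generalizing i with
  | nil => simp [matched] at h
  | cons x t ih =>
    simp only [matched] at h
    cases hq : cFirst (pvNorm x) 0 cs with
    | none => rw [hq] at h; exact ih _ h
    | some r =>
      rw [hq] at h
      rcases List.mem_cons.mp h with h1 | h2
      · subst h1; exact cFirst_ge cs _ 0 r hq
      · exact ih _ h2

theorem foldMin_stay (L : List (Int × Int)) (b : Int × Int)
    (h : ∀ q ∈ L, b.1 ≤ q.1) : foldMin (some b) L = some b := by
  induction L with
  | nil => rfl
  | cons p t ih =>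
    have hb : bBetter p.1 (some b) = false := by
      have := h p List.mem_cons_self
      simp [bBetter]; omega
    simp only [foldMin, hb, Bool.false_eq_true, if_false]
    exact ih (fun q hq => h q (List.mem_cons_of_mem _ hq))

theorem foldMin_shift (L : List (Int × Int)) (a : Option (Int × Int)) :
    foldMin (a.map (fun p => (p.1 + 1, p.2))) (L.map (fun p => (p.1 + 1, p.2))) =
      (foldMin a L).map (fun p => (p.1 + 1, p.2)) := by
  induction L generalizing a with
  | nil => rfl
  | cons p t ih =>
    have hb : bBetter (p.1 + 1) (a.map (fun p => (p.1 + 1, p.2))) = bBetter p.1 a := by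
      cases a with
      | none => rfl
      | some b => simp [bBetter]
    simp only [List.map_cons, foldMin, hb]
    by_cases hc : bBetter p.1 a = true
    · rw [if_pos hc, if_pos hc, ← ih (some p)]; rfl
    · rw [if_neg hc, if_neg hc, ih]

theorem matched_shift (c : String) (cs hs : List String) (i0 : Int)
    (h : aFirstLoop c i0 hs = none) :
    matched (c :: cs) i0 hs = (matched cs i0 hs).map (fun p => (p.1 + 1, p.2)) := by
  induction hs generalizing i0 with
  | nil => rfl
  | cons x t ih =>
    simp only [aFirstLoop] at h
    simp only [matched]
    by_cases he : pvNorm x = ""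
    · rw [if_pos he] at h
      rw [he, cFirst_none_empty, cFirst_none_empty, ih _ h]
    · rw [if_neg he] at h
      by_cases hm : pvNorm x = c
      · rw [if_pos hm] at h; exact absurd h (by simp)
      · rw [if_neg hm] at h
        rw [cFirst_cons _ _ _ (Or.inr (fun h' => hm h'.symm))]
        cases hq : cFirst (pvNorm x) 0 cs with
        | none => simp only [Option.map_none]; rw [ih _ h]
        | some r =>
          simp only [Option.map_some]
          rw [List.map_cons, ih _ h]

theorem zeroCase (c : String) (cs hs : List String) (i0 j : Int) (a : Option (Int × Int))
    (h : aFirstLoop c i0 hs = some j)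
    (ha : a = none ∨ ∃ b, a = some b ∧ 0 < b.1) :
    foldMin a (matched (c :: cs) i0 hs) = some (0, j) := by
  induction hs generalizing i0 a with
  | nil => simp [aFirstLoop] at h
  | cons x t ih =>
    simp only [aFirstLoop] at h
    simp only [matched]
    by_cases he : pvNorm x = ""
    · rw [if_pos he] at h
      rw [he, cFirst_none_empty]
      exact ih _ _ h ha
    · rw [if_neg he] at h
      by_cases hm : pvNorm x = c
      · rw [if_pos hm] at h
        have hj : j = i0 := by cases h; rfl
        subst hj
        have hcne : ¬ c = "" := hm ▸ he
        have hc0 : cFirst (pvNorm x) 0 (c :: cs) = some 0 := by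
          simp only [cFirst]
          rw [if_neg hcne, if_pos hm.symm]
        rw [hc0]
        have hb : bBetter 0 a = true := by
          rcases ha with rfl | ⟨b, rfl, hb1⟩
          · rfl
          · simp [bBetter]; omega
        simp only [foldMin, hb, if_true]
        exact foldMin_stay _ _ (fun q hq => matched_nonneg _ _ _ q hq)
      · rw [if_neg hm] at h
        rw [cFirst_cons _ _ _ (Or.inr (fun h' => hm h'.symm))]
        cases hq : cFirst (pvNorm x) 0 cs with
        | none => exact ih _ _ h ha
        | some r =>
          have hr : 0 ≤ r := cFirst_ge cs _ 0 r hq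
          simp only [Option.map_some, foldMin]
          by_cases hbb : bBetter (r + 1) a = true
          · rw [if_pos hbb]
            exact ih _ _ h (Or.inr ⟨(r + 1, i0), rfl, by omega⟩)
          · rw [if_neg hbb]
            exact ih _ _ h ha

theorem matched_nil_cands (hs : List String) (i : Int) : matched [] i hs = [] := by
  induction hs generalizing i with
  | nil => rfl
  | cons x t ih => simp only [matched, cFirst]; exact ih _

theorem bScan_eq_foldMin (rk : PySem.Dict String Int) (cs : List String)
    (hrk : ∀ s, rk.get? s = cFirst s 0 cs) (hs : List String) (i : Int) (best : Option (Int × Int)) :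
    bScan rk i best hs = foldMin best (matched cs i hs) := by
  induction hs generalizing i best with
  | nil => rfl
  | cons x t ih =>
    simp only [bScan, matched, hrk]
    cases cFirst (pvNorm x) 0 cs with
    | none => exact ih _ _
    | some r =>
      simp only [foldMin]
      by_cases hb : bBetter r best = true
      · rw [if_pos hb, if_pos hb]; exact ih _ _
      · rw [if_neg hb, if_neg hb]; exact ih _ _

theorem tryAll_eq_foldMin (cs hs : List String) (i0 : Int) :
    tryAll hs i0 cs = (foldMin none (matched cs i0 hs)).map Prod.snd := by
  induction cs with
  | nil => rw [matched_nil_cands]; rfl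
  | cons c cs' ih =>
    simp only [tryAll]
    cases h : aFirstLoop c i0 hs with
    | some j => rw [zeroCase c cs' hs i0 j none h (Or.inl rfl)]; rfl
    | none =>
      rw [matched_shift c cs' hs i0 h]
      have := foldMin_shift (matched cs' i0 hs) none
      simp only [Option.map_none] at this
      rw [this, ih]
      cases foldMin none (matched cs' i0 hs) <;> rfl

-- for a non-empty pattern, A's synonym inner scan equals its first loop
theorem aMatch_eq_aFirstLoop (syn : String) (hsyn : syn ≠ "") (i : Int) (hs : List String) :
    aMatch syn i hs = aFirstLoop syn i hs := by
  induction hs generalizing i with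
  | nil => rfl
  | cons h t ih =>
    simp only [aMatch, aFirstLoop]
    by_cases he : pvNorm h = ""
    · have hm : pvNorm h ≠ syn := by rw [he]; exact fun h' => hsyn h'.symm
      rw [if_neg hm, if_pos he, ih]
    · rw [if_neg he]
      by_cases hm : pvNorm h = syn
      · rw [if_pos hm, if_pos hm]
      · rw [if_neg hm, if_neg hm, ih]

-- every synonym in the table is a non-empty string
theorem synonyms_ne_empty (field syn : String)
    (h : syn ∈ (pvFieldSynonyms.get? field).getD []) : syn ≠ "" := by
  cases hq : pvFieldSynonyms.get? field with
  | none => rw [hq] at h; simp at h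
  | some v =>
    rw [hq] at h
    simp only [Option.getD_some] at h
    have hv : (field, v) ∈ pvFieldSynonyms.items := PySem.Dict.mem_items_of_get?_eq_some _ hq
    have hv' : v ∈ pvFieldSynonyms.items.map Prod.snd := List.mem_map_of_mem hv
    have hall : ∀ w ∈ pvFieldSynonyms.items.map Prod.snd, ∀ s ∈ w, s ≠ "" := by decide
    exact hall v hv' syn h

-- A's synonym pass is tryAll on the synonyms
theorem aSynLoop_eq_tryAll (headers syns : List String) (hne : ∀ s ∈ syns, s ≠ "") :
    aSynLoop headers syns = tryAll headers 0 syns := by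
  induction syns with
  | nil => rfl
  | cons s rest ih =>
    simp only [aSynLoop, tryAll]
    rw [aMatch_eq_aFirstLoop s (hne s List.mem_cons_self) 0 headers]
    cases aFirstLoop s 0 headers with
    | some i => rfl
    | none => exact ih (fun x hx => hne x (List.mem_cons_of_mem _ hx))

-- ===== VERDICT (by name: the statement is the Claim_ definition above) =====
theorem index_for_py_spec : Claim_equal_index_for_py := by
  intro field headers _
  unfold Spec_index_for_py index_for_py index_for_py_alt
  dsimp only
  have hA : (match aFirstLoop (PySem.Str.lower field) 0 headers with
      | some i => some i
      | none => aSynLoop headers ((pvFieldSynonyms.get? field).getD [])) =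
      tryAll headers 0 (bCands field) := by
    simp only [bCands, tryAll]
    cases aFirstLoop (PySem.Str.lower field) 0 headers with
    | some i => rfl
    | none => exact aSynLoop_eq_tryAll headers _ (fun s hs => synonyms_ne_empty field s hs)
  rw [hA, tryAll_eq_foldMin (bCands field) headers 0,
    bScan_eq_foldMin _ (bCands field)
      (fun s => by rw [get?_bRank, PySem.Dict.get?_empty, Option.none_or]) headers 0 none]
  cases foldMin none (matched (bCands field) 0 headers) <;> rfl
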